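-- pv_equiv track=rewrite | github.com/divyalekha99/python-label-refinement | distance_metrics.py | _get_set_distance_for_strings
-- ===== SOURCE A (Python) =====
-- from typing import Set
--
-- def _get_set_distance_for_strings(string_a: Set[str], string_b: Set[str]) -> int:
--     distance = 0
--     if len(string_a) > len(string_b):
--         long_sting = string_a
--         short_string = string_b
--     else:
--         long_sting = string_b
--         short_string = string_a
--     for label in long_sting:
--         if label not in short_string:
--             distance += 1
--     return distance
-- ===== SOURCE B (Python) =====
-- def _get_set_distance_for_strings(string_a, string_b):
--     return max(len(string_a - string_b), len(string_b - string_a))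
-- ===== Notes on version B (the rewrite author's own statement) =====
-- stated objective: simpler
-- what changed: Replaces the length-comparison branch and the explicit membership-counting loop with a single expression: the maximum of the two directional set-difference sizes, which equals the missing-element count from the longer set.
import Mathlib
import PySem

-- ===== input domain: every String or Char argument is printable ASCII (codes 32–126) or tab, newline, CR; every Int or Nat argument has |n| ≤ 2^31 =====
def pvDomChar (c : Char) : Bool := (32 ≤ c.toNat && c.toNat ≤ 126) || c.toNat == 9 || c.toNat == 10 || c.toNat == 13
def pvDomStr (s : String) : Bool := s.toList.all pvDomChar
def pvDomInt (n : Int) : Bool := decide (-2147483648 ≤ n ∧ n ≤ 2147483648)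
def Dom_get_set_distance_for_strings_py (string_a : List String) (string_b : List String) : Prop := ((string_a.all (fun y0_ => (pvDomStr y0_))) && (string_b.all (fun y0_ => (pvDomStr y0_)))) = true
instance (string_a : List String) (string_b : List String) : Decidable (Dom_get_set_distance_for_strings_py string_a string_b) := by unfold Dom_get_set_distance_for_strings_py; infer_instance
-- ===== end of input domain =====

-- B computes the answer as max of the two directional set-difference sizes, removing
-- A's size-comparison branch and its membership-counting loop (objective: simpler).

-- ===== PORT A =====
def get_set_distance_for_strings_py (string_a : List String) (string_b : List String) : Int :=
  let distance : Int := 0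
  -- if len(string_a) > len(string_b): long = a, short = b else long = b, short = a
  let pair := if string_a.length > string_b.length then (string_a, string_b) else (string_b, string_a)
  -- for label in long: if label not in short: distance += 1
  pair.1.foldl (fun d label => if !(pair.2.contains label) then d + 1 else d) distance

-- ===== PORT B =====
def get_set_distance_for_strings_py_alt (string_a : List String) (string_b : List String) : Int :=
  max (PySem.Set.len (PySem.Set.diff string_a string_b)) (PySem.Set.len (PySem.Set.diff string_b string_a))

-- ===== PRECONDITION & SPEC =====
-- Pre_ states only the type-convention encoding of the Python 'set' arguments: the
-- element lists are duplicate-free (a list with duplicates does not encode a set).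
def Pre_get_set_distance_for_strings_py (string_a : List String) (string_b : List String) : Prop :=
  string_a.Nodup ∧ string_b.Nodup
instance (string_a : List String) (string_b : List String) : Decidable (Pre_get_set_distance_for_strings_py string_a string_b) := by unfold Pre_get_set_distance_for_strings_py; infer_instance

def pvWitness_get_set_distance_for_strings_py : List String × List String := (["a"], ["a", "b"])

def Spec_get_set_distance_for_strings_py (string_a : List String) (string_b : List String) (out : Int) : Prop := out = get_set_distance_for_strings_py_alt string_a string_b
instance (string_a : List String) (string_b : List String) (out : Int) : Decidable (Spec_get_set_distance_for_strings_py string_a string_b out) := by unfold Spec_get_set_distance_for_strings_py; infer_instance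

-- ===== CLAIM (what is proved, stated in full; the proofs are below) =====
def Claim_equal_get_set_distance_for_strings_py : Prop := ∀ (string_a : List String) (string_b : List String), Dom_get_set_distance_for_strings_py string_a string_b → Pre_get_set_distance_for_strings_py string_a string_b → Spec_get_set_distance_for_strings_py string_a string_b (get_set_distance_for_strings_py string_a string_b)

-- ===== LEMMAS AND PROOFS =====

-- A's counting loop computes the length of the not-in-short filter.
theorem pv_foldl_count (t : List String) (l : List String) (d : Int) :
    l.foldl (fun d label => if !(t.contains label) then d + 1 else d) d
      = d + ((l.filter (fun x => !t.contains x)).length : Int) := by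
  induction l generalizing d with
  | nil => simp
  | cons h tl ih =>
    rw [List.foldl_cons, List.filter_cons]
    by_cases hc : t.contains h = true
    · simp only [hc, Bool.not_true, Bool.false_eq_true, if_false]
      exact ih d
    · have hc' : t.contains h = false := by simpa using hc
      simp only [hc', Bool.not_false, if_true]
      rw [ih (d + 1), List.length_cons]
      push_cast
      ring

theorem pv_len_split (p : String → Bool) (l : List String) :
    (l.filter p).length + (l.filter (fun x => !p x)).length = l.length := by
  induction l with
  | nil => simp
  | cons h tl ih =>
    by_cases hc : p h = true <;> simp [List.filter_cons, hc] <;> omega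

-- intersection counts agree for duplicate-free lists
theorem pv_inter_count (a b : List String) (ha : a.Nodup) (hb : b.Nodup) :
    (a.filter (fun x => b.contains x)).length = (b.filter (fun x => a.contains x)).length := by
  have hna : (a.filter (fun x => b.contains x)).Nodup := ha.filter _
  have hnb : (b.filter (fun x => a.contains x)).Nodup := hb.filter _
  have h1 : (a.filter (fun x => b.contains x)).toFinset = a.toFinset ∩ b.toFinset := by
    ext x; simp [List.mem_filter, List.contains_iff_mem]
  have h2 : (b.filter (fun x => a.contains x)).toFinset = b.toFinset ∩ a.toFinset := by
    ext x; simp [List.mem_filter, List.contains_iff_mem]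
  have c1 := List.toFinset_card_of_nodup hna
  have c2 := List.toFinset_card_of_nodup hnb
  rw [← c1, ← c2, h1, h2, Finset.inter_comm]

-- ===== VERDICT (by name: the statement is the Claim_ definition above) =====
theorem get_set_distance_for_strings_py_spec : Claim_equal_get_set_distance_for_strings_py := by
  intro a b _ hpre
  obtain ⟨ha, hb⟩ := hpre
  unfold Spec_get_set_distance_for_strings_py
  unfold get_set_distance_for_strings_py get_set_distance_for_strings_py_alt
  simp only [PySem.Set.len, PySem.Set.diff, PySem.Set.contains]
  have key := pv_inter_count a b ha hb
  have sa := pv_len_split (fun x => b.contains x) a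
  have sb := pv_len_split (fun x => a.contains x) b
  by_cases hlen : a.length > b.length
  · simp only [hlen, if_pos]
    rw [pv_foldl_count]
    have : (b.filter (fun x => !a.contains x)).length ≤ (a.filter (fun x => !b.contains x)).length := by omega
    simp only [zero_add]
    rw [max_eq_left (by exact_mod_cast this)]
  · simp only [hlen, if_neg, if_false]
    rw [pv_foldl_count]
    have hle : ¬ a.length > b.length := hlen
    have : (a.filter (fun x => !b.contains x)).length ≤ (b.filter (fun x => !a.contains x)).length := by omega
    simp only [zero_add]
    rw [max_eq_right (by exact_mod_cast this)]
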